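-- pv_equiv track=rewrite | github.com/Whonceuponatime/Multi-time-Pad-Attack | MTP.py | myXOR
-- ===== SOURCE A (Python) =====
-- def myXOR(x, y):
--     res = 0 # Initialize result
--
--     # Assuming 32-bit Integer
--     for i in range(31, -1, -1):
--
--         # Find current bits in x and y
--         b1 = x & (1 << i)
--         b2 = y & (1 << i)
--         b1 = min(b1, 1)
--         b2 = min(b2, 1)
--
--         # If both are 1 then 0
--         # else xor is same as OR
--         xoredBit = 0
--         if (b1 & b2):
--             xoredBit = 0
--         else:
--             xoredBit = (b1 | b2)
--
--         # Update result
--         res <<= 1;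
--         res |= xoredBit
--     return res
-- ===== SOURCE B (Python) =====
-- def myXOR(x, y):
--     # closed form: native XOR, truncated to the low 32 bits (bits 31..0),
--     # exactly what A's 32-iteration bit loop assembles
--     return (x ^ y) & 0xFFFFFFFF
-- ===== Notes on version B (the rewrite author's own statement) =====
-- stated objective: simpler
-- what changed: Replaced the 32-iteration bit-by-bit loop (mask, min, branch, shift-or per bit) with the closed form (x ^ y) & 0xFFFFFFFF.
import Mathlib
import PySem

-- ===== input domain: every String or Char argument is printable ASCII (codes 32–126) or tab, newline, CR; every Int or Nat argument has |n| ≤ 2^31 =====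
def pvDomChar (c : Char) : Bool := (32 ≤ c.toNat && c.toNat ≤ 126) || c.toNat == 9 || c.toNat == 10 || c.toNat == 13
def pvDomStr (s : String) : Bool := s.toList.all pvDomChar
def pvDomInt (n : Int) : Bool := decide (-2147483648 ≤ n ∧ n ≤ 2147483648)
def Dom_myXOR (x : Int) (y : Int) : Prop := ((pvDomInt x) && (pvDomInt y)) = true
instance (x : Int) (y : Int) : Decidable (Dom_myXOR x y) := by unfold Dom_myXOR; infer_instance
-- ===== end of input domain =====

-- B replaces A's 32-iteration bit-by-bit loop with the closed form (x ^ y) & 0xFFFFFFFF (simpler; equal on all ints).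

-- ===== PORT A =====
-- the loop body of A (i ≥ 0 always in range(31,-1,-1), so '1 << i' is '1 <<< i.toNat')
def xorStep (x y : Int) : Int → Int → Int := fun res i =>
  let b1 := PySem.Int.band x ((1:Int) <<< i.toNat)
  let b2 := PySem.Int.band y ((1:Int) <<< i.toNat)
  let b1 := min b1 1
  let b2 := min b2 1
  let xoredBit : Int := if PySem.Int.band b1 b2 ≠ 0 then 0 else PySem.Int.bor b1 b2
  PySem.Int.bor (res <<< (1:Nat)) xoredBit

def myXOR (x : Int) (y : Int) : Int :=
  (PySem.List.pyRange 31 (-1) (-1)).foldl (xorStep x y) 0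

-- ===== PORT B =====
def myXOR_alt (x : Int) (y : Int) : Int :=
  PySem.Int.band (PySem.Int.bxor x y) 0xFFFFFFFF

-- ===== PRECONDITION & SPEC =====
def Spec_myXOR (x : Int) (y : Int) (out : Int) : Prop := out = myXOR_alt x y
instance (x : Int) (y : Int) (out : Int) : Decidable (Spec_myXOR x y out) := by unfold Spec_myXOR; infer_instance

-- ===== CLAIM (what is proved, stated in full; the proofs are below) =====
def Claim_equal_myXOR : Prop := ∀ (x : Int) (y : Int), Dom_myXOR x y → Spec_myXOR x y (myXOR x y)

-- ===== LEMMAS AND PROOFS =====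

-- Python's bit n of an integer (two's complement on negatives)
def pbit (x : Int) (n : Nat) : Bool :=
  if 0 ≤ x then x.toNat.testBit n else !((-x - 1).toNat.testBit n)

-- Python's  z & (2^n - 1)  (the low n bits of z, two's complement on negatives)
def lowBits (z : Int) (n : Nat) : Int :=
  if 0 ≤ z then ((z.toNat % 2 ^ n : Nat) : Int)
  else (((2 ^ n - 1) - ((-z - 1).toNat % 2 ^ n) : Nat) : Int)

theorem pow2cast (n : Nat) : (2:Int) ^ n = ((2 ^ n : Nat) : Int) := by push_cast; ring

theorem two_mul_lor_one (a : Nat) : 2 * a ||| 1 = 2 * a + 1 := by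
  apply Nat.eq_of_testBit_eq
  intro i
  cases i with
  | zero => simp
  | succ j =>
    rw [Nat.testBit_or]
    simp [Nat.testBit_succ, Nat.mul_comm 2 a]
    have h : (a * 2 + 1) / 2 = a := by omega
    rw [h]

theorem band_two_pow (x : Int) (n : Nat) :
    PySem.Int.band x ((2:Int) ^ n) = if pbit x n then 2 ^ n else 0 := by
  rw [pow2cast]
  unfold PySem.Int.band pbit
  by_cases hx : 0 ≤ x
  · simp only [hx, if_true, Int.natCast_nonneg, Int.toNat_natCast]
    rw [Nat.land_comm, Nat.two_pow_and]
    rcases h : x.toNat.testBit n <;> simp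
  · simp only [hx, if_false, Int.natCast_nonneg, if_true, Int.toNat_natCast]
    rw [Nat.two_pow_and]
    rcases h : (-x - 1).toNat.testBit n <;> simp

theorem min_band_two_pow (x : Int) (n : Nat) :
    min (PySem.Int.band x ((2:Int) ^ n)) 1 = if pbit x n then 1 else 0 := by
  rw [band_two_pow]
  have h1 : (1:Int) ≤ 2 ^ n := one_le_pow₀ (by norm_num)
  rcases h : pbit x n <;> simp [min_eq_right h1]

theorem pbit_bxor (x y : Int) (n : Nat) :
    pbit (PySem.Int.bxor x y) n = Bool.xor (pbit x n) (pbit y n) := by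
  unfold PySem.Int.bxor pbit
  by_cases hx : 0 ≤ x <;> by_cases hy : 0 ≤ y <;> simp only [hx, hy, if_true, if_false]
  · simp [Nat.testBit_xor]
  · have hneg : ¬ (0:Int) ≤ -((x.toNat ^^^ (-y - 1).toNat : Nat) : Int) - 1 := by
      have := Int.natCast_nonneg (x.toNat ^^^ (-y - 1).toNat); omega
    simp only [hneg, if_false]
    have harg : (-(-((x.toNat ^^^ (-y - 1).toNat : Nat) : Int) - 1) - 1).toNat
        = x.toNat ^^^ (-y - 1).toNat := by omega
    rw [harg, Nat.testBit_xor]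
    rcases x.toNat.testBit n <;> rcases ((-y - 1).toNat.testBit n) <;> rfl
  · have hneg : ¬ (0:Int) ≤ -(((-x - 1).toNat ^^^ y.toNat : Nat) : Int) - 1 := by
      have := Int.natCast_nonneg ((-x - 1).toNat ^^^ y.toNat); omega
    simp only [hneg, if_false]
    have harg : (-(-(((-x - 1).toNat ^^^ y.toNat : Nat) : Int) - 1) - 1).toNat
        = (-x - 1).toNat ^^^ y.toNat := by omega
    rw [harg, Nat.testBit_xor]
    rcases (-x - 1).toNat.testBit n <;> rcases y.toNat.testBit n <;> rfl
  · simp only [Int.natCast_nonneg, if_true, Int.toNat_natCast]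
    rw [Nat.testBit_xor]
    rcases (-x - 1).toNat.testBit n <;> rcases (-y - 1).toNat.testBit n <;> rfl

theorem band_mask (z : Int) (n : Nat) :
    PySem.Int.band z ((2:Int) ^ n - 1) = lowBits z n := by
  have hb : (0:Int) ≤ 2 ^ n - 1 := by
    have : (1:Int) ≤ 2 ^ n := one_le_pow₀ (by norm_num); omega
  have hbt : ((2:Int) ^ n - 1).toNat = 2 ^ n - 1 := by rw [pow2cast]; omega
  unfold PySem.Int.band lowBits
  by_cases hz : 0 ≤ z
  · simp only [hz, hb, if_true, hbt]
    rw [Nat.and_two_pow_sub_one_eq_mod]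
  · simp only [hz, hb, if_false, if_true, hbt]
    rw [Nat.land_comm, Nat.and_two_pow_sub_one_eq_mod]

theorem lowBits_zero (z : Int) : lowBits z 0 = 0 := by
  unfold lowBits; split <;> simp

theorem lowBits_succ (z : Int) (n : Nat) :
    lowBits z (n + 1) = (if pbit z n then (2:Int) ^ n else 0) + lowBits z n := by
  unfold lowBits pbit
  by_cases hz : 0 ≤ z <;> simp only [hz, if_true, if_false]
  · have hm := Nat.mod_pow_succ (x := z.toNat) (b := 2) (k := n)
    have hlt : z.toNat % 2 ^ n < 2 ^ n := Nat.mod_lt _ (by positivity)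
    rw [Nat.testBit_eq_decide_div_mod_eq, hm, pow2cast]
    by_cases hbit : z.toNat / 2 ^ n % 2 = 1
    · simp only [hbit, decide_true, if_true, mul_one]
      omega
    · have h0 : z.toNat / 2 ^ n % 2 = 0 := by omega
      simp only [h0, mul_zero]
      norm_num
  · have hm := Nat.mod_pow_succ (x := (-z - 1).toNat) (b := 2) (k := n)
    have hlt : (-z - 1).toNat % 2 ^ n < 2 ^ n := Nat.mod_lt _ (by positivity)
    have hlt2 : (-z - 1).toNat % 2 ^ (n + 1) < 2 ^ (n + 1) := Nat.mod_lt _ (by positivity)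
    rw [Nat.testBit_eq_decide_div_mod_eq, pow2cast]
    rw [Nat.pow_succ] at hm hlt2 ⊢
    by_cases hbit : (-z - 1).toNat / 2 ^ n % 2 = 1
    · rw [hbit, mul_one] at hm
      simp only [hbit, decide_true, Bool.not_true, Bool.false_eq_true, if_false]
      omega
    · have h0 : (-z - 1).toNat / 2 ^ n % 2 = 0 := by omega
      rw [h0, mul_zero, Nat.add_zero] at hm
      simp only [h0, Nat.zero_ne_one, decide_false, Bool.not_false, if_true]
      omega

theorem bor_two_mul_bit (r : Int) (hr : 0 ≤ r) (b : Int) (hb : b = 0 ∨ b = 1) :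
    PySem.Int.bor (2 * r) b = 2 * r + b := by
  have h2 : (0:Int) ≤ 2 * r := by omega
  rcases hb with hb | hb <;> subst hb
  · simp
  · unfold PySem.Int.bor
    rw [if_pos h2, if_pos (by norm_num : (0:Int) ≤ 1)]
    have hr2 : (2 * r).toNat = 2 * r.toNat := by omega
    have h1 : (1:Int).toNat = 1 := rfl
    rw [hr2, h1, two_mul_lor_one]
    omega

theorem step_eval (x y r : Int) (hr : 0 ≤ r) (n : Nat) :
    xorStep x y r (n : Int) = 2 * r + (if pbit (PySem.Int.bxor x y) n then 1 else 0) := by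
  simp only [xorStep, Int.toNat_natCast]
  have hpow : (1:Int) <<< n = 2 ^ n := by rw [Int.shiftLeft_eq]; ring
  have hshift : r <<< (1:Nat) = 2 * r := by rw [Int.shiftLeft_eq]; ring
  rw [hpow, min_band_two_pow, min_band_two_pow, hshift, pbit_bxor]
  rcases hx : pbit x n <;> rcases hy : pbit y n <;>
    simp only [if_true, if_false, Bool.xor_false, Bool.xor_true, Bool.not_true, Bool.not_false,
      Bool.false_eq_true] <;>
    norm_num
  · rw [show (if PySem.Int.band 0 1 = 0 then PySem.Int.bor 0 1 else 0) = 1 from by decide,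
      bor_two_mul_bit r hr 1 (Or.inr rfl)]
  · rw [bor_two_mul_bit r hr 1 (Or.inr rfl)]

theorem loop_inv (x y : Int) : ∀ (n : Nat) (r : Int), 0 ≤ r →
    (PySem.List.pyRange ((n : Int) - 1) (-1) (-1)).foldl (xorStep x y) r
      = r * 2 ^ n + lowBits (PySem.Int.bxor x y) n := by
  intro n
  induction n with
  | zero =>
    intro r hr
    have h0 : ((0 : Nat) : Int) - 1 = -1 := by norm_num
    rw [h0, PySem.List.pyRange_neg_one_eq_nil (le_refl (-1)), lowBits_zero]
    simp
  | succ n ih =>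
    intro r hr
    have hc : ((n + 1 : Nat) : Int) - 1 = (n : Int) := by push_cast; ring
    have hlt : (-1 : Int) < (n : Int) := by omega
    rw [hc, PySem.List.pyRange_neg_one_cons hlt, List.foldl_cons, step_eval x y r hr n]
    have hb : (0:Int) ≤ 2 * r + (if pbit (PySem.Int.bxor x y) n then 1 else 0) := by
      split <;> omega
    rw [ih _ hb, lowBits_succ]
    rcases hb : pbit (PySem.Int.bxor x y) n <;> simp [pow_succ] <;> ring

-- ===== VERDICT (by name: the statement is the Claim_ definition above) =====
theorem myXOR_spec : Claim_equal_myXOR := by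
  intro x y _
  unfold Spec_myXOR myXOR myXOR_alt
  have h := loop_inv x y 32 0 le_rfl
  norm_num at h
  rw [h]
  have hm : (0xFFFFFFFF : Int) = (2:Int) ^ 32 - 1 := by norm_num
  rw [hm, band_mask]
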